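-- pv_equiv track=rewrite | github.com/Masha1111/Kuhn | main.py | get_number_nodes
-- ===== SOURCE A (Python) =====
-- def get_number_nodes(arr):
--     letters = set()
--     for el in arr:
--         for node in el:
--             letters.add(node)
--     letters = list(letters)
--     letters.sort()
--     numbers = []
--     for i in range(len(letters)):
--         numbers.append(i)
--     return letters
-- ===== SOURCE B (Python) =====
-- def get_number_nodes(arr):
--     nodes = [n for el in arr for n in el]
--     nodes.sort()
--     out = []
--     for n in nodes:
--         if not out or out[-1] != n:
--             out.append(n)
--     return out
-- ===== Notes on version B (the rewrite author's own statement) =====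
-- stated objective: simpler
-- what changed: Replaces the set-accumulation (plus a dead `numbers` index loop) by flatten, sort once, then a single adjacent-duplicate scan; the dead loop is dropped.
import Mathlib
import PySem

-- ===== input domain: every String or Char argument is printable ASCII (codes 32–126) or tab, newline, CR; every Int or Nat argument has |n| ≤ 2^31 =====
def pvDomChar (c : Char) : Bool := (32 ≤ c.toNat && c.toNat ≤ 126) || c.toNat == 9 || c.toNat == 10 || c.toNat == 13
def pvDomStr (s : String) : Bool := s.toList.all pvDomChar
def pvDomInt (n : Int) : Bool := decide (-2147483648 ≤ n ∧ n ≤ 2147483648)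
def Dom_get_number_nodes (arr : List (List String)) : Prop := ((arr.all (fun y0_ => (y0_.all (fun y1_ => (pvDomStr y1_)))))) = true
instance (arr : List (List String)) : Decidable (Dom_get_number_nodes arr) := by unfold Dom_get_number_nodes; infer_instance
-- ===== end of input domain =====

-- B replaces A's set-accumulation (and drops A's dead `numbers` loop) by flatten, sort, one adjacent-duplicate scan: simpler, same result.

-- ===== PORT A =====
def get_number_nodes (arr : List (List String)) : List String :=
  let letters : PySem.Set String :=
    arr.foldl (fun s el => el.foldl (fun s' node => PySem.Set.add s' node) s) PySem.Set.empty
  let letters2 := PySem.List.sorted letters (fun x => x) false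
  let _numbers : List Int :=
    (PySem.List.pyRange 0 (PySem.List.len letters2) 1).foldl (fun ns i => ns ++ [i]) []
  letters2

-- ===== PORT B =====
def get_number_nodes_alt (arr : List (List String)) : List String :=
  let nodes := arr.flatMap (fun el => el)
  let sortedNodes := PySem.List.sorted nodes (fun x => x) false
  sortedNodes.foldl (fun out n => if out = [] ∨ out.getLast? ≠ some n then out ++ [n] else out) []

-- ===== PRECONDITION & SPEC =====
def Spec_get_number_nodes (arr : List (List String)) (out : List String) : Prop := out = get_number_nodes_alt arr
instance (arr : List (List String)) (out : List String) : Decidable (Spec_get_number_nodes arr out) := by unfold Spec_get_number_nodes; infer_instance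

-- ===== CLAIM (what is proved, stated in full; the proofs are below) =====
def Claim_equal_get_number_nodes : Prop := ∀ (arr : List (List String)), Dom_get_number_nodes arr → Spec_get_number_nodes arr (get_number_nodes arr)

-- ===== LEMMAS AND PROOFS =====

-- the adjacent-duplicate scan, written as plain recursion on (previous element, rest)
def uniqRec (prev : Option String) : List String → List String
  | [] => []
  | x :: xs => if prev = some x then uniqRec prev xs else x :: uniqRec (some x) xs

theorem foldl_uniq_eq (L : List String) (acc : List String) :
    L.foldl (fun out n => if out = [] ∨ out.getLast? ≠ some n then out ++ [n] else out) acc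
      = acc ++ uniqRec acc.getLast? L := by
  induction L generalizing acc with
  | nil => simp [uniqRec]
  | cons x xs ih =>
    simp only [List.foldl_cons, uniqRec]
    by_cases h : acc.getLast? = some x
    · have hne : acc ≠ [] := by intro hnil; simp [hnil] at h
      rw [if_neg (by simp [h, hne]), if_pos h, ih]
    · rw [if_pos (by tauto), if_neg h, ih, List.getLast?_append]
      simp

theorem string_nodes_foldl_flat (arr : List (List String)) (s : PySem.Set String) :
    arr.foldl (fun s el => el.foldl (fun s' node => PySem.Set.add s' node) s) s
      = (arr.flatMap (fun el => el)).foldl (fun s' node => PySem.Set.add s' node) s := by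
  induction arr generalizing s with
  | nil => simp
  | cons el rest ih => simp [List.foldl_append, ih]

theorem uniqRec_spec (L : List String) (p : Option String)
    (hL : L.Pairwise (· ≤ ·)) (hp : ∀ y ∈ L, ∀ v, p = some v → v ≤ y) :
    (uniqRec p L).Pairwise (· < ·) ∧ (∀ x, x ∈ uniqRec p L ↔ x ∈ L ∧ p ≠ some x) := by
  induction L generalizing p with
  | nil => simp [uniqRec]
  | cons x xs ih =>
    have hxs : xs.Pairwise (· ≤ ·) := hL.of_cons
    have hxle : ∀ y ∈ xs, x ≤ y := fun y hy => List.rel_of_pairwise_cons hL hy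
    by_cases h : p = some x
    · have ⟨h1, h2⟩ := ih p hxs (by
        intro y hy v hv
        exact (hp y (List.mem_cons_of_mem _ hy) v hv))
      refine ⟨by simpa [uniqRec, h] using h1, ?_⟩
      intro z
      rw [show uniqRec p (x :: xs) = uniqRec p xs by simp [uniqRec, h], h2]
      constructor
      · rintro ⟨hz, hnz⟩; exact ⟨List.mem_cons_of_mem _ hz, hnz⟩
      · rintro ⟨hz, hnz⟩
        rcases List.mem_cons.mp hz with rfl | hz'
        · exact absurd h hnz
        · exact ⟨hz', hnz⟩
    · have ⟨h1, h2⟩ := ih (some x) hxs (by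
        intro y hy v hv
        cases hv; exact hxle y hy)
      have heq : uniqRec p (x :: xs) = x :: uniqRec (some x) xs := by simp [uniqRec, h]
      refine ⟨?_, ?_⟩
      · rw [heq]
        refine List.Pairwise.cons ?_ h1
        intro y hy
        have := (h2 y).mp hy
        exact lt_of_le_of_ne (hxle y this.1) (fun hxy => this.2 (by rw [hxy]))
      · intro z
        rw [heq]
        simp only [List.mem_cons, h2]
        constructor
        · rintro (rfl | ⟨hz, hnz⟩)
          · exact ⟨Or.inl rfl, fun hpz => h hpz⟩
          · refine ⟨Or.inr hz, ?_⟩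
            intro hpz
            have hzx : z ≤ x := hp x List.mem_cons_self z hpz
            have hxz : x ≤ z := hxle z hz
            exact hnz (by rw [le_antisymm hzx hxz])
        · rintro ⟨rfl | hz, hnz⟩
          · exact Or.inl rfl
          · by_cases hzx : z = x
            · exact Or.inl hzx
            · exact Or.inr ⟨hz, fun hsx => hzx (by cases hsx; rfl)⟩

-- ===== VERDICT (by name: the statement is the Claim_ definition above) =====
theorem get_number_nodes_spec : Claim_equal_get_number_nodes := by
  intro arr _
  unfold Spec_get_number_nodes get_number_nodes get_number_nodes_alt
  simp only
  set L := arr.flatMap (fun el => el) with hL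
  rw [string_nodes_foldl_flat, foldl_uniq_eq]
  simp only [List.nil_append, List.getLast?_nil]
  have hset : L.foldl (fun s' node => PySem.Set.add s' node) PySem.Set.empty = PySem.Set.ofList L := rfl
  rw [hset]
  have hsp : (PySem.List.sorted L (fun x => x) false).Pairwise (· ≤ ·) :=
    PySem.List.sorted_pairwise L (fun x => x)
  obtain ⟨h1, h2⟩ := uniqRec_spec (PySem.List.sorted L (fun x => x) false) none hsp (by simp)
  refine PySem.List.sorted_eq_of_perm_of_pairwise_lt _ _ _ ?_ h1
  rw [List.perm_ext_iff_of_nodup (by exact h1.imp (fun h => ne_of_lt h)) (PySem.Set.nodup_ofList L)]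
  intro x
  rw [h2 x, PySem.Set.mem_ofList, PySem.List.mem_sorted]
  simp
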